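-- pv_equiv track=rewrite | github.com/techlearnpoornima-code/advanced-rag-chatbo | src/chunking/semantic_chunker.py | _contains_answer_span
-- ===== SOURCE A (Python) =====
-- from typing import List, Dict, Any, Tuple
--
-- def _contains_answer_span(
--
--     chunk_sentence_indices: List[int],
--     outputs: List[Dict[str, Any]]
-- ) -> bool:
--     """Check if chunk contains answer sentences."""
--     if not outputs:
--         return False
--
--     chunk_set = set(chunk_sentence_indices)
--
--     for output in outputs:
--         answer_sentences = output.get('selected_sentences', [])
--         if answer_sentences and any(s in chunk_set for s in answer_sentences):
--             return True
--
--     return False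
-- ===== SOURCE B (Python) =====
-- from typing import List, Dict, Any
--
-- def _contains_answer_span(chunk_sentence_indices, outputs):
--     """Sort-then-merge: sort chunk indices and all answer indices, then a
--     two-pointer merge scan decides whether the sorted sequences share a value."""
--     answers = sorted(s for output in outputs
--                        for s in output.get('selected_sentences', []))
--     chunk = sorted(chunk_sentence_indices)
--     i = j = 0
--     while i < len(chunk) and j < len(answers):
--         if chunk[i] == answers[j]:
--             return True
--         if chunk[i] < answers[j]:
--             i += 1
--         else:
--             j += 1
--     return False
-- ===== Notes on version B (the rewrite author's own statement) =====
-- stated objective: alternative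
-- what changed: Replaced A's hash-set membership scan (short-circuiting per output) by a sort-then-merge algorithm: flatten all selected sentence indices, sort both sequences, and run a two-pointer merge scan that detects a common element.
import Mathlib
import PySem

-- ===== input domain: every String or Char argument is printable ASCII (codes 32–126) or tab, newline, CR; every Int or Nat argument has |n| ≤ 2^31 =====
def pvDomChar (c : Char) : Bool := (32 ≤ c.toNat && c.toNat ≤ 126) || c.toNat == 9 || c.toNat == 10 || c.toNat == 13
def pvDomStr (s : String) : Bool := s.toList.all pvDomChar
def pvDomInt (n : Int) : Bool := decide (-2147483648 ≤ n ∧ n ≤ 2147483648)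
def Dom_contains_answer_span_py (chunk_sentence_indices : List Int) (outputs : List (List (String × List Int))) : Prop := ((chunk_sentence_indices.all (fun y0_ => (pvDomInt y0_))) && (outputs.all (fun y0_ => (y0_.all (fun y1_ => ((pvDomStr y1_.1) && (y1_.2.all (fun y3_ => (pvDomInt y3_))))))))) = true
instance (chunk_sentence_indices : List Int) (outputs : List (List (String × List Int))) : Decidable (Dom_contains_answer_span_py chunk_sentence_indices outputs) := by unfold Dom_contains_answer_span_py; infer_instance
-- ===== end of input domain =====

-- B replaces A's hash-set membership scan by a sort-then-merge algorithm: flatten all answer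
-- indices, sort both sequences, and a two-pointer merge scan detects a common element (alternative).


-- ===== PORT A =====
-- for output in outputs: … return True on first hit; return False at the end
def pvALoop (chunk_set : PySem.Set Int) : List (List (String × List Int)) → Bool
  | [] => false
  | output :: rest =>
      let answer_sentences := PySem.Dict.getD (PySem.Dict.mk output) "selected_sentences" []
      if (!answer_sentences.isEmpty) && answer_sentences.any (fun s => chunk_set.contains s) then
        true
      else
        pvALoop chunk_set rest

def contains_answer_span_py (chunk_sentence_indices : List Int) (outputs : List (List (String × List Int))) : Bool :=
  if outputs.isEmpty then false
  else
    let chunk_set := PySem.Set.ofList chunk_sentence_indices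
    pvALoop chunk_set outputs

-- ===== PORT B =====
-- the two-pointer while loop, consuming the heads of the two sorted lists
def pvMerge : List Int → List Int → Bool
  | [], _ => false
  | _ :: _, [] => false
  | a :: as, b :: bs =>
      if a == b then true
      else if a < b then pvMerge as (b :: bs)
      else pvMerge (a :: as) bs

def contains_answer_span_py_alt (chunk_sentence_indices : List Int) (outputs : List (List (String × List Int))) : Bool :=
  let answers := PySem.List.sorted
    (outputs.flatMap (fun output => PySem.Dict.getD (PySem.Dict.mk output) "selected_sentences" []))
    (fun x => x) false
  let chunk := PySem.List.sorted chunk_sentence_indices (fun x => x) false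
  pvMerge chunk answers

-- ===== PRECONDITION & SPEC =====
def Spec_contains_answer_span_py (chunk_sentence_indices : List Int) (outputs : List (List (String × List Int))) (out : Bool) : Prop := out = contains_answer_span_py_alt chunk_sentence_indices outputs
instance (chunk_sentence_indices : List Int) (outputs : List (List (String × List Int))) (out : Bool) : Decidable (Spec_contains_answer_span_py chunk_sentence_indices outputs out) := by unfold Spec_contains_answer_span_py; infer_instance

-- ===== CLAIM (what is proved, stated in full; the proofs are below) =====
def Claim_equal_contains_answer_span_py : Prop := ∀ (chunk_sentence_indices : List Int) (outputs : List (List (String × List Int))), Dom_contains_answer_span_py chunk_sentence_indices outputs → Spec_contains_answer_span_py chunk_sentence_indices outputs (contains_answer_span_py chunk_sentence_indices outputs)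

-- ===== LEMMAS AND PROOFS =====
theorem pvGuard_any (g : List Int) (p : Int → Bool) : ((!g.isEmpty) && g.any p) = g.any p := by
  cases g <;> simp

theorem pvALoop_eq_any (cs : PySem.Set Int) (l : List (List (String × List Int))) :
    pvALoop cs l =
      l.any (fun o => (PySem.Dict.getD (PySem.Dict.mk o) "selected_sentences" ([] : List Int)).any
        (fun s => cs.contains s)) := by
  induction l with
  | nil => rfl
  | cons o rest ih =>
      simp only [pvALoop, List.any_cons, ih]
      rw [pvGuard_any]
      cases hg : (PySem.Dict.getD (PySem.Dict.mk o) "selected_sentences" ([] : List Int)).any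
        (fun s => cs.contains s) <;> simp

-- merge scan on two ≤-sorted lists decides "do they share an element"
theorem pvMerge_iff (xs ys : List Int)
    (hx : xs.Pairwise (· ≤ ·)) (hy : ys.Pairwise (· ≤ ·)) :
    pvMerge xs ys = true ↔ ∃ x, x ∈ xs ∧ x ∈ ys := by
  induction xs, ys using pvMerge.induct with
  | case1 ys => simp [pvMerge]
  | case2 a as => simp [pvMerge]
  | case3 a as b bs hab =>
      rw [beq_iff_eq] at hab; subst hab
      simp only [pvMerge, if_pos (beq_self_eq_true a), true_iff]
      exact ⟨a, List.mem_cons_self, List.mem_cons_self⟩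
  | case4 a as b bs hab hlt ih =>
      have hne : a ≠ b := by simpa using hab
      have hx' := (List.pairwise_cons.mp hx).2
      have hbs := (List.pairwise_cons.mp hy).1
      simp only [pvMerge, if_neg hab, if_pos hlt]
      rw [ih hx' hy]
      constructor
      · rintro ⟨x, hxas, hxys⟩; exact ⟨x, List.mem_cons_of_mem _ hxas, hxys⟩
      · rintro ⟨x, hxxs, hxys⟩
        rcases List.mem_cons.mp hxxs with rfl | hxas
        · exfalso
          rcases List.mem_cons.mp hxys with rfl | hxbs
          · exact hne rfl
          · have := hbs x hxbs
            omega
        · exact ⟨x, hxas, hxys⟩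
  | case5 a as b bs hab hlt ih =>
      have hne : a ≠ b := by simpa using hab
      have hy' := (List.pairwise_cons.mp hy).2
      have has := (List.pairwise_cons.mp hx).1
      simp only [pvMerge, if_neg hab, if_neg hlt]
      rw [ih hx hy']
      constructor
      · rintro ⟨x, hxxs, hxbs⟩; exact ⟨x, hxxs, List.mem_cons_of_mem _ hxbs⟩
      · rintro ⟨x, hxxs, hxys⟩
        rcases List.mem_cons.mp hxys with rfl | hxbs
        · exfalso
          rcases List.mem_cons.mp hxxs with rfl | hxas
          · exact hne rfl
          · have := has x hxas
            omega
        · exact ⟨x, hxxs, hxbs⟩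

-- ===== VERDICT (by name: the statement is the Claim_ definition above) =====
theorem contains_answer_span_py_spec : Claim_equal_contains_answer_span_py := by
  intro c outputs _
  unfold Spec_contains_answer_span_py contains_answer_span_py contains_answer_span_py_alt
  rw [Bool.eq_iff_iff,
    pvMerge_iff _ _ (by simpa using PySem.List.sorted_pairwise c (fun x => x))
      (by simpa using PySem.List.sorted_pairwise _ (fun x => x))]
  simp only [PySem.List.mem_sorted, List.mem_flatMap]
  by_cases he : outputs.isEmpty = true
  · rcases List.isEmpty_iff.mp he with rfl
    simp
  · rw [if_neg he, pvALoop_eq_any]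
    simp only [List.any_eq_true, PySem.Set.contains, List.contains_iff_mem, PySem.Set.mem_ofList]
    constructor
    · rintro ⟨o, ho, s, hs, hc⟩; exact ⟨s, hc, o, ho, hs⟩
    · rintro ⟨x, hx, o, ho, hxo⟩; exact ⟨o, ho, x, hxo, hx⟩
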